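-- pv_equiv track=rewrite | github.com/rmasters/ciphers | vigenere/vigenere.py | generate_tabula_recta
-- ===== SOURCE A (Python) =====
-- def generate_tabula_recta(alphabet):
--     """
--     Build an alphabet table as so:
--
--     Alpha     Array     Alphabet-index
--
--       A B C     0 1 2     0 1 2
--     A A B C   0 A B C   0 0 1 2
--     B B C D   1 B C D   1 1 2 3
--     C C D E   2 C D E   2 2 3 4
--
--     """
--
--     table = []
--     for x in range(0, len(alphabet)):
--         table.append([])
--         for y in range(0, len(alphabet)):
--             # Wrap around the alphabet if overflow
--             alpha_idx = (x + y) % len(alphabet)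
--             table[x].append(alphabet[alpha_idx])
--
--     return table
-- ===== SOURCE B (Python) =====
-- def generate_tabula_recta(alphabet):
--     # Build each row in one shot as a rotation (slice + slice) instead of
--     # per-cell modular indexing.
--     return [list(alphabet[x:]) + list(alphabet[:x]) for x in range(len(alphabet))]
-- ===== Notes on version B (the rewrite author's own statement) =====
-- stated objective: idiomatic
-- what changed: Replaces the nested per-cell loop with (x+y)%n indexing by a single comprehension that builds each row as a rotation via two slices, list(alphabet[x:]) + list(alphabet[:x]).
import Mathlib
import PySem

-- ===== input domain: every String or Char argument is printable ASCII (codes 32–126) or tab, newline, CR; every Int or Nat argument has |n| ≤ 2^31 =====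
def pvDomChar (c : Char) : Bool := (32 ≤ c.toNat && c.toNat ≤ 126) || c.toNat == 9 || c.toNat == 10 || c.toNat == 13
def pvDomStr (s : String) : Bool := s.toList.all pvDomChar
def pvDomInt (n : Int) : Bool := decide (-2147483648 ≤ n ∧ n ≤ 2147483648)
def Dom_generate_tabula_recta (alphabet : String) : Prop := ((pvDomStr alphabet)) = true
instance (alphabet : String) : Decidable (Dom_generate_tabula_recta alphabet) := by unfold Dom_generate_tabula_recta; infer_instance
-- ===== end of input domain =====

-- B builds each row as a rotation via two slices instead of per-cell (x+y)%n indexing; same output, same O(n^2) cost.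
-- ===== PORT A =====
def generate_tabula_recta (alphabet : String) : List (List String) :=
  let cs := alphabet.toList
  let n : Int := (cs.length : Int)
  (PySem.List.pyRange 0 n 1).foldl (fun table x =>
    table ++ [(PySem.List.pyRange 0 n 1).foldl (fun row y =>
      -- alpha_idx = (x + y) % len(alphabet); alphabet[alpha_idx] (index always in range, so getD's default is never used)
      row ++ [(PySem.List.pyGetD cs (PySem.Int.mod (x + y) n) ' ').toString]) []]) []

-- ===== PORT B =====
def generate_tabula_recta_alt (alphabet : String) : List (List String) :=
  let cs := alphabet.toList
  (List.range cs.length).map (fun (x : Nat) =>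
    (PySem.List.slice cs (some ((x : Nat) : Int)) none ++ PySem.List.slice cs none (some ((x : Nat) : Int))).map
      (fun c => c.toString))

-- ===== PRECONDITION & SPEC =====
def Spec_generate_tabula_recta (alphabet : String) (out : List (List String)) : Prop := out = generate_tabula_recta_alt alphabet
instance (alphabet : String) (out : List (List String)) : Decidable (Spec_generate_tabula_recta alphabet out) := by unfold Spec_generate_tabula_recta; infer_instance

-- ===== CLAIM (what is proved, stated in full; the proofs are below) =====
def Claim_equal_generate_tabula_recta : Prop := ∀ (alphabet : String), Dom_generate_tabula_recta alphabet → Spec_generate_tabula_recta alphabet (generate_tabula_recta alphabet)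

-- ===== LEMMAS AND PROOFS =====

-- one row of A equals the corresponding rotated row of B
theorem row_eq (cs : List Char) (x : Nat) (hx : x < cs.length) :
    (List.range cs.length).map (fun y => (cs.getD ((x + y) % cs.length) ' ').toString)
      = (cs.drop x ++ cs.take x).map (fun c => c.toString) := by
  have hrot : cs.drop x ++ cs.take x = cs.rotate x :=
    (List.rotate_eq_drop_append_take (le_of_lt hx)).symm
  rw [hrot]
  apply List.ext_getElem
  · simp
  · intro i h1 h2
    have hn : 0 < cs.length := by omega
    have hlt : (x + i) % cs.length < cs.length := Nat.mod_lt _ hn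
    simp only [List.getElem_map, List.getElem_range]
    rw [List.getElem_rotate, List.getD_eq_getElem _ _ hlt, Nat.add_comm i x]

-- ===== VERDICT (by name: the statement is the Claim_ definition above) =====
theorem generate_tabula_recta_spec : Claim_equal_generate_tabula_recta := by
  intro alphabet _
  unfold Spec_generate_tabula_recta generate_tabula_recta generate_tabula_recta_alt
  set cs := alphabet.toList with hcs
  simp only [PySem.List.foldl_append_singleton_eq_map, List.nil_append,
    PySem.List.pyRange_zero_natCast]
  simp only [List.map_map]
  apply List.map_congr_left
  intro x hx
  have hx' : x < cs.length := List.mem_range.mp hx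
  simp only [Function.comp, PySem.List.slice_from_natCast, PySem.List.slice_to_natCast]
  rw [← row_eq cs x hx']
  apply List.map_congr_left
  intro y hy
  simp only [Function.comp_apply]
  have h : PySem.Int.mod ((x : Int) + (y : Int)) (cs.length : Int)
      = (((x + y) % cs.length : Nat) : Int) := by
    rw [← Nat.cast_add]; exact PySem.Int.mod_natCast _ _
  rw [h, PySem.List.pyGetD_natCast]
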